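-- pv_equiv track=rewrite | github.com/Zumh/interview | codePattern/twoPointers/1_removeDuplicates.py | remove_duplicates_key
-- ===== SOURCE A (Python) =====
-- def remove_duplicates_key(nums:list[int], key:int)->int:
--     distinct_len = 0
--
--     next_unique_pos = 0
--     curr_indx = 0
--
--     for curr_indx, curr_num in enumerate(nums):
--
--         # if we found a new number different from input key, update unique values
--         if curr_num != key:
--             nums[next_unique_pos] = curr_num
--
--             next_unique_pos += 1
--
--     distinct_len = next_unique_pos
--     return distinct_len
-- ===== SOURCE B (Python) =====
-- def remove_duplicates_key(nums: list[int], key: int) -> int: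
--     # Two-pointer from both ends: when a key is found at the left pointer,
--     # overwrite it with the element at the right pointer and shrink the right
--     # end; otherwise advance left.  The compacted order differs from A's;
--     # the return value is the same: the number of elements != key.
--     left = 0
--     right = len(nums) - 1
--     while left <= right:
--         if nums[left] == key:
--             nums[left] = nums[right]
--             right -= 1
--         else:
--             left += 1
--     return left
-- ===== Notes on version B (the rewrite author's own statement) =====
-- stated objective: alternative
-- what changed: B replaces A's single forward read/compact loop by a two-pointer scan from both ends that swaps key elements to the shrinking right end (order of kept elements not preserved); equivalence is about the return value, the compacted prefix order differs.
import Mathlib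
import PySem

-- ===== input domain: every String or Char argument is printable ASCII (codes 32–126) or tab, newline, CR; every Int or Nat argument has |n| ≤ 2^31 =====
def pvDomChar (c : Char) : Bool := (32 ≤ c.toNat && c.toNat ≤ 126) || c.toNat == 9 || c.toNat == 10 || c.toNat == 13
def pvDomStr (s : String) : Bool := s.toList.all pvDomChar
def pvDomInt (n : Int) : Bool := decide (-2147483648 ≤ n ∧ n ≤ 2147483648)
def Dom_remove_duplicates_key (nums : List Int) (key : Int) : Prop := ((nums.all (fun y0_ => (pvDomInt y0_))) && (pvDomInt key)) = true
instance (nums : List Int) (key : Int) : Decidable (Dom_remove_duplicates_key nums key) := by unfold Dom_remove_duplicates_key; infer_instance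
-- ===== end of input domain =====

-- B replaces A's forward compacting scan by a two-pointer scan from both ends (key elements are
-- overwritten with the shrinking right end); both mutate the Python list, but in different orders —
-- the equivalence proved here is about the RETURN value only (the count of elements != key).

-- ===== PORT A =====
-- state = (nums array being overwritten, next_unique_pos); curr_indx is only the loop index.
-- Reads in Python's `enumerate(nums)` see the original values: the loop only ever overwrites
-- positions ≤ the current index with the same value when equal, so folding the ORIGINAL list is exact.
def remove_duplicates_key (nums : List Int) (key : Int) : Int :=
  let st := nums.foldl
    (fun (st : List Int × Nat) curr_num =>
      if curr_num ≠ key then (st.1.set st.2 curr_num, st.2 + 1) else st)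
    (nums, 0)
  (st.2 : Int)

-- ===== PORT B =====
-- while left ≤ right: read nums[left]; either overwrite it with nums[right] and shrink right, or
-- advance left.  Whenever the loop body runs, 0 ≤ left ≤ right < len, so pyGetD's default is never
-- used and left.toNat is exact (left never goes negative).
def rdkGo (key : Int) (arr : List Int) (left right : Int) : Int :=
  if _h : left ≤ right then
    if PySem.List.pyGetD arr left 0 = key then
      rdkGo key (arr.set left.toNat (PySem.List.pyGetD arr right 0)) left (right - 1)
    else
      rdkGo key arr (left + 1) right
  else
    left
termination_by (right + 1 - left).toNat
decreasing_by all_goals omega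

def remove_duplicates_key_alt (nums : List Int) (key : Int) : Int :=
  rdkGo key nums 0 ((nums.length : Int) - 1)

-- ===== PRECONDITION & SPEC =====
def Spec_remove_duplicates_key (nums : List Int) (key : Int) (out : Int) : Prop := out = remove_duplicates_key_alt nums key
instance (nums : List Int) (key : Int) (out : Int) : Decidable (Spec_remove_duplicates_key nums key out) := by unfold Spec_remove_duplicates_key; infer_instance

-- ===== CLAIM (what is proved, stated in full; the proofs are below) =====
def Claim_equal_remove_duplicates_key : Prop := ∀ (nums : List Int) (key : Int), Dom_remove_duplicates_key nums key → Spec_remove_duplicates_key nums key (remove_duplicates_key nums key)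

-- ===== LEMMAS AND PROOFS =====

-- A's counter after the loop = starting value + number of elements kept.
theorem rdk_foldl_count (key : Int) (xs : List Int) :
    ∀ (arr : List Int) (p : Nat),
      (xs.foldl
        (fun (st : List Int × Nat) curr_num =>
          if curr_num ≠ key then (st.1.set st.2 curr_num, st.2 + 1) else st)
        (arr, p)).2 = p + (xs.filter (fun x => x ≠ key)).length := by
  induction xs with
  | nil => intro arr p; simp
  | cons x xs ih =>
    intro arr p
    rw [List.foldl_cons]
    by_cases h : x = key
    · rw [if_neg (by simp [h]), ih]
      simp [h]
    · rw [if_pos h, ih]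
      simp [h]
      omega

-- B's loop invariant: the result is left + (count of non-key elements in arr[left..right]).
theorem rdkGo_eq (key : Int) : ∀ (n : Nat) (arr : List Int) (left right : Int),
    (right + 1 - left).toNat = n → 0 ≤ left → right < (arr.length : Int) →
    rdkGo key arr left right
      = left + (((arr.drop left.toNat).take (right + 1 - left).toNat).countP (fun x => x ≠ key) : Int) := by
  intro n
  induction n using Nat.strong_induction_on with
  | _ n ih =>
    intro arr left right hn hl hr
    obtain ⟨L, rfl⟩ : ∃ L : Nat, left = (L : Int) := ⟨left.toNat, by omega⟩
    rw [rdkGo]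
    by_cases hlr : (L : Int) ≤ right
    · rw [dif_pos hlr]
      obtain ⟨R, rfl⟩ : ∃ R : Nat, right = (R : Int) := ⟨right.toNat, by omega⟩
      have hLlen : L < arr.length := by omega
      have hRlen : R < arr.length := by omega
      have hLR : L ≤ R := by omega
      have hv : PySem.List.pyGetD arr (L : Int) 0 = arr[L] := by
        rw [PySem.List.pyGetD_eq_getElem arr (0 : Int) (by omega) (by omega)]
        simp
      have hvr : PySem.List.pyGetD arr (R : Int) 0 = arr[R] := by
        rw [PySem.List.pyGetD_eq_getElem arr (0 : Int) (by omega) (by omega)]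
        simp
      have hm1 : ((R : Int) + 1 - (L : Int)).toNat = (R - L) + 1 := by omega
      have hdropL : arr.drop L = arr[L] :: arr.drop (L + 1) :=
        List.drop_eq_getElem_cons hLlen
      by_cases hkey : arr[L] = key
      · rw [if_pos (hv ▸ hkey)]
        have ih' := ih ((R : Int) - (L : Int)).toNat (by omega)
          (arr.set ((L : Int)).toNat (PySem.List.pyGetD arr (R : Int) 0)) (L : Int) ((R : Int) - 1)
          (by omega) (by omega) (by simp; omega)
        rw [ih']
        congr 1
        have hdrop' : (arr.set ((L : Int)).toNat (PySem.List.pyGetD arr (R : Int) 0)).drop ((L : Int)).toNat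
            = (PySem.List.pyGetD arr (R : Int) 0) :: arr.drop (L + 1) := by
          simp only [Int.toNat_natCast]
          rw [List.drop_eq_getElem_cons (by simpa using hLlen)]
          congr 1
          · simp
          · rw [List.drop_set_of_lt (by omega)]
        have hm2 : ((R : Int) - 1 + 1 - (L : Int)).toNat = R - L := by omega
        rw [hm2, hdrop', hvr]
        simp only [Int.toNat_natCast, hm1, hdropL]
        rcases Nat.eq_or_lt_of_le hLR with hEq | hLt
        · subst hEq
          simp [hkey]
        · obtain ⟨k, hk⟩ : ∃ k : Nat, R - L = k + 1 := ⟨R - L - 1, by omega⟩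
          rw [hk, List.take_succ_cons, List.take_succ_cons]
          have hidx : k < (arr.drop (L + 1)).length := by simp; omega
          have hgd : (arr.drop (L + 1))[k] = arr[R] := by
            rw [List.getElem_drop]
            congr 1
            omega
          rw [List.take_add_one, List.getElem?_eq_getElem hidx, hgd]
          simp [List.countP_cons, List.countP_append, hkey]
      · rw [if_neg (hv ▸ hkey)]
        have ih' := ih ((R : Int) - (L : Int)).toNat (by omega) arr ((L : Int) + 1) (R : Int)
          (by omega) (by omega) (by omega)
        rw [ih']
        have hL1 : ((L : Int) + 1).toNat = L + 1 := by omega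
        have hm2 : ((R : Int) + 1 - ((L : Int) + 1)).toNat = R - L := by omega
        rw [hL1, hm2]
        simp only [Int.toNat_natCast, hm1, hdropL, List.take_succ_cons]
        simp [hkey]
        ring
    · rw [dif_neg hlr]
      have h0 : ((right : Int) + 1 - (L : Int)).toNat = 0 := by omega
      simp [h0]

-- ===== VERDICT (by name: the statement is the Claim_ definition above) =====
theorem remove_duplicates_key_spec : Claim_equal_remove_duplicates_key := by
  intro nums key _
  unfold Spec_remove_duplicates_key remove_duplicates_key remove_duplicates_key_alt
  show ((nums.foldl
      (fun (st : List Int × Nat) curr_num =>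
        if curr_num ≠ key then (st.1.set st.2 curr_num, st.2 + 1) else st)
      (nums, 0)).2 : Int) = rdkGo key nums 0 ((nums.length : Int) - 1)
  rw [rdk_foldl_count key nums nums 0,
      rdkGo_eq key ((nums.length : Int) - 1 + 1 - 0).toNat nums 0 ((nums.length : Int) - 1)
        rfl (by omega) (by omega)]
  have : ((nums.length : Int) - 1 + 1 - 0).toNat = nums.length := by omega
  simp [List.countP_eq_length_filter]
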